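-- pv_equiv track=rewrite | github.com/MaOlszewska/AlgorithmsAndDataStructures-2020 | Colloquiums and exams/Graph/2020_21_Breaking.py | breaking
-- ===== SOURCE A (Python) =====
-- def DFS_visit(G, u, visited, i):
--     visited[u] = True
--     for v in range(len(G)):
--         if visited[v] == False and G[u][v] == 1:
--             DFS_visit(G, v, visited, i)
--
-- def breaking(G):
--     n = len(G)
--     best_vertex = None
--     max_count = 0
--     for i in range(n):
--         visited = [False for _ in range(n)]
--         visited[i] = None
--         count = 0
--         for u in range(n):
--             if u != i and visited[u] is False:
--                 DFS_visit(G,u,visited, i)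
--                 count += 1
--             if count > max_count:
--                 max_count = count
--                 best_vertex = i
--     if max_count == 1:
--         return None
--     return best_vertex
-- ===== SOURCE B (Python) =====
-- def breaking(G):
--     # Iterative frontier-BFS per removed vertex, counts collected then argmaxed once.
--     n = len(G)
--     counts = []
--     for i in range(n):
--         seen = [u == i for u in range(n)]
--         c = 0
--         for u in range(n):
--             if not seen[u]:
--                 c += 1
--                 seen[u] = True
--                 frontier = [u]
--                 while frontier:
--                     nxt = []
--                     for x in frontier:
--                         for v in range(n):
--                             if G[x][v] == 1 and not seen[v]:
--                                 seen[v] = True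
--                                 nxt.append(v)
--                     frontier = nxt
--         counts.append(c)
--     m = max(counts, default=0)
--     return counts.index(m) if m >= 2 else None
-- ===== Notes on version B (the rewrite author's own statement) =====
-- stated objective: alternative
-- what changed: A's recursive DFS over a tri-state visited list with a running max updated inside the scan is replaced by an iterative frontier-BFS per removed vertex that collects a counts list and takes max/first-index once at the end.
-- outside the precondition, e.g. on breaking([[], [0]]): A returns None, B raises IndexError
import Mathlib
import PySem

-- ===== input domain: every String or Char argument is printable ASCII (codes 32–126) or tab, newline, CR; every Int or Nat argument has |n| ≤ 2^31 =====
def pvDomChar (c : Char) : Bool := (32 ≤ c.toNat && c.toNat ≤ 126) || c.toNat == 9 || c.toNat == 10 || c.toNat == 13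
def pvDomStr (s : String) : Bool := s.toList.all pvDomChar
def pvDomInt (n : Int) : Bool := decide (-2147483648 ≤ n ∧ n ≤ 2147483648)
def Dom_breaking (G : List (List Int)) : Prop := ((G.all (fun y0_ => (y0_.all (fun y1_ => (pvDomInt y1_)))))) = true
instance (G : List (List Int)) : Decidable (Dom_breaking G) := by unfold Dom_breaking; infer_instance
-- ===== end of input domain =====

-- B replaces A's recursive DFS (tri-state visited, running max updated in-loop) by an
-- iterative frontier BFS per removed vertex with a counts list argmaxed once at the end.

-- ===== PORT A =====
-- DFS_visit(G, u, visited, i): recursion bounded by `fuel` (Python recursion depth is at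
-- most the number of still-False entries, ≤ len(G); breaking passes fuel = len(G)).
def dfsVisit (G : List (List Int)) : Nat → Nat → List (Option Bool) → List (Option Bool)
  | 0, _, visited => visited
  | fuel+1, u, visited =>
    (List.range G.length).foldl
      (fun vis v =>
        if vis.getD v none = some false ∧ (G.getD u []).getD v 0 = 1 then
          dfsVisit G fuel v vis
        else vis)
      (visited.set u (some true))

def breaking (G : List (List Int)) : Option Int :=
  let n := G.length
  let res := (List.range n).foldl
    (fun (acc : Option Int × Int) i =>
      let visited := ((List.range n).map (fun _ => some false)).set i none
      let st := (List.range n).foldl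
        (fun (st : List (Option Bool) × Int × Option Int × Int) u =>
          let st2 := if u ≠ i ∧ st.1.getD u none = some false then
              (dfsVisit G n u st.1, st.2.1 + 1, st.2.2.1, st.2.2.2)
            else st
          if st2.2.1 > st2.2.2.2 then (st2.1, st2.2.1, some (i : Int), st2.2.1) else st2)
        (visited, 0, acc.1, acc.2)
      (st.2.2.1, st.2.2.2))
    (none, 0)
  if res.2 = 1 then none else res.1

-- ===== PORT B =====
-- while frontier: one relaxation round; fuel = len(G) bounds the rounds (each nonempty
-- round marks at least one new vertex).
def bfsLoop (G : List (List Int)) : Nat → List Bool → List Nat → List Bool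
  | _, seen, [] => seen
  | 0, seen, _ => seen
  | fuel+1, seen, frontier =>
    let p := frontier.foldl
      (fun (q : List Bool × List Nat) x =>
        (List.range G.length).foldl
          (fun (q : List Bool × List Nat) v =>
            if (G.getD x []).getD v 0 = 1 ∧ q.1.getD v true = false then
              (q.1.set v true, q.2 ++ [v])
            else q)
          q)
      (seen, [])
    bfsLoop G fuel p.1 p.2

def breaking_alt (G : List (List Int)) : Option Int :=
  let n := G.length
  let counts := (List.range n).foldl
    (fun (cs : List Int) i =>
      let seen := (List.range n).map (fun u => u == i)
      let p := (List.range n).foldl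
        (fun (p : Int × List Bool) u =>
          if p.2.getD u true = false then (p.1 + 1, bfsLoop G n (p.2.set u true) [u]) else p)
        (0, seen)
      cs ++ [p.1])
    []
  let m := (PySem.List.max? counts (fun x => x)).getD 0
  if m ≥ 2 then (PySem.List.index? counts m).map (fun k => (k : Int)) else none

-- ===== PRECONDITION & SPEC =====
-- Pre excludes ragged matrices (some row shorter than len(G), with len(G) ≥ 2): on those
-- Python A raises IndexError or, depending on which entries its DFS happens to probe,
-- returns an accidental value, while B always scans every row fully and raises IndexError.
def Pre_breaking (G : List (List Int)) : Prop :=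
  G.length ≤ 1 ∨ ∀ row ∈ G, G.length ≤ row.length
instance (G : List (List Int)) : Decidable (Pre_breaking G) := by unfold Pre_breaking; infer_instance
def pvWitness_breaking : List (List Int) := [[0, 1], [1, 0]]

def Spec_breaking (G : List (List Int)) (out : Option Int) : Prop := out = breaking_alt G
instance (G : List (List Int)) (out : Option Int) : Decidable (Spec_breaking G out) := by unfold Spec_breaking; infer_instance

-- ===== CLAIM (what is proved, stated in full; the proofs are below) =====
def Claim_equal_breaking : Prop := ∀ (G : List (List Int)), Dom_breaking G → Pre_breaking G → Spec_breaking G (breaking G)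

-- ===== LEMMAS AND PROOFS =====

-- blocked-view of the two visited representations: a vertex the traversal may not enter.
def blockedA (vis : List (Option Bool)) (v : Nat) : Prop := vis.getD v none ≠ some false
def blockedB (seen : List Bool) (v : Nat) : Prop := seen.getD v true = true

def adjP (G : List (List Int)) (x v : Nat) : Prop := (G.getD x []).getD v 0 = 1

-- vertices reachable from u through not-initially-blocked vertices
inductive Reach (G : List (List Int)) (b : Nat → Prop) (u : Nat) : Nat → Prop
  | base : Reach G b u u
  | step {x v : Nat} : Reach G b u x → adjP G x v → v < G.length → ¬ b v → Reach G b u v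

def EvoA (vis vis' : List (Option Bool)) : Prop :=
  ∀ v, vis'.getD v none = vis.getD v none ∨ (vis.getD v none = some false ∧ vis'.getD v none = some true)

def EvoB (s s' : List Bool) : Prop :=
  ∀ v, s'.getD v true = s.getD v true ∨ (s.getD v true = false ∧ s'.getD v true = true)

def measA (G : List (List Int)) (vis : List (Option Bool)) : Nat :=
  ((Finset.range G.length).filter (fun v => vis.getD v none = some false)).card

def measB (G : List (List Int)) (s : List Bool) : Nat :=
  ((Finset.range G.length).filter (fun v => s.getD v true = false)).card

theorem reach_blocked {G b u v} (h : Reach G b u v) : v = u ∨ ¬ b v := by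
  cases h with
  | base => exact Or.inl rfl
  | step _ _ _ hb => exact Or.inr hb

theorem reach_mono {G} {b b' : Nat → Prop} (hsub : ∀ v, b v → b' v) {u w} (h : Reach G b' u w) :
    Reach G b u w := by
  induction h with
  | base => exact Reach.base
  | step _ hadj hlt hb ih => exact ih.step hadj hlt (fun hc => hb (hsub _ hc))

theorem reach_congr {G} {b b' : Nat → Prop} (h : ∀ v, b v ↔ b' v) {u w} :
    Reach G b u w ↔ Reach G b' u w :=
  ⟨reach_mono (fun v hv => (h v).2 hv), reach_mono (fun v hv => (h v).1 hv)⟩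

theorem reach_diag {G} {b : Nat → Prop} {u w} :
    Reach G b u w ↔ Reach G (fun v => b v ∨ v = u) u w := by
  constructor
  · intro h
    induction h with
    | base => exact Reach.base
    | step _ hadj hlt hb ih =>
      rename_i x v _
      by_cases hv : v = u
      · subst hv; exact Reach.base
      · exact ih.step hadj hlt (by tauto)
  · exact reach_mono (fun v hv => Or.inl hv)

theorem reach_absorb_multi {G} {b b' R : Nat → Prop}
    (hsub : ∀ v, b v → b' v) :
    ∀ {x w}, Reach G b' x w → (∃ r, R r ∧ Reach G b r x) → ∃ r, R r ∧ Reach G b r w := by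
  intro x w h hx
  induction h with
  | base => exact hx
  | step _ hadj hlt hb ih =>
    obtain ⟨r, hr, hrw⟩ := ih
    exact ⟨r, hr, hrw.step hadj hlt (fun hc => hb (hsub _ hc))⟩

theorem getD_set_eq_ite {α : Type} (l : List α) (i j : Nat) (a d : α) :
    (l.set i a).getD j d = if j = i ∧ i < l.length then a else l.getD j d := by
  simp only [List.getD_eq_getElem?_getD, List.getElem?_set]
  split_ifs with h1 h2 h3 <;> simp_all

theorem evoA_trans {v1 v2 v3 : List (Option Bool)} (h1 : EvoA v1 v2) (h2 : EvoA v2 v3) : EvoA v1 v3 := by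
  intro v; rcases h1 v with h | ⟨ha, hb⟩ <;> rcases h2 v with h' | ⟨ha', hb'⟩ <;> simp_all [EvoA]

theorem evoB_trans {v1 v2 v3 : List Bool} (h1 : EvoB v1 v2) (h2 : EvoB v2 v3) : EvoB v1 v3 := by
  intro v; rcases h1 v with h | ⟨ha, hb⟩ <;> rcases h2 v with h' | ⟨ha', hb'⟩ <;> simp_all [EvoB]

theorem evoA_blocked {vis vis'} (h : EvoA vis vis') {v} (hb : blockedA vis v) : blockedA vis' v := by
  unfold blockedA at *
  rcases h v with h' | ⟨ha, hb'⟩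
  · rw [h']; exact hb
  · exact absurd ha hb

theorem evoB_blocked {s s'} (h : EvoB s s') {v} (hb : blockedB s v) : blockedB s' v := by
  unfold blockedB at *
  rcases h v with h' | ⟨ha, hb'⟩
  · rw [h']; exact hb
  · exact hb'

theorem measA_le (G : List (List Int)) (vis) : measA G vis ≤ G.length := by
  calc ((Finset.range G.length).filter _).card ≤ (Finset.range G.length).card :=
        Finset.card_filter_le _ _
    _ = G.length := Finset.card_range _

theorem measB_le (G : List (List Int)) (s) : measB G s ≤ G.length := by
  calc ((Finset.range G.length).filter _).card ≤ (Finset.range G.length).card :=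
        Finset.card_filter_le _ _
    _ = G.length := Finset.card_range _

theorem measA_mono {G vis vis'} (h : EvoA vis vis') : measA G vis' ≤ measA G vis := by
  apply Finset.card_le_card
  intro v hv
  simp only [Finset.mem_filter, Finset.mem_range] at *
  rcases h v with h' | ⟨ha, hb⟩
  · exact ⟨hv.1, h'.symm.trans hv.2⟩
  · exact absurd (hb.symm.trans hv.2) (by simp)

theorem measA_lt {G vis vis'} (h : EvoA vis vis') {u} (hu : u < G.length)
    (h1 : vis.getD u none = some false) (h2 : blockedA vis' u) : measA G vis' < measA G vis := by
  apply Finset.card_lt_card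
  constructor
  · intro v hv
    simp only [Finset.mem_filter, Finset.mem_range] at *
    rcases h v with h' | ⟨ha, hb⟩
    · exact ⟨hv.1, h'.symm.trans hv.2⟩
    · exact absurd (hb.symm.trans hv.2) (by simp)
  · intro hsub
    have := hsub (by simp only [Finset.mem_filter, Finset.mem_range]; exact ⟨hu, h1⟩)
    simp only [Finset.mem_filter, Finset.mem_range] at this
    exact h2 this.2

theorem measB_lt {G s s'} (h : EvoB s s') {u} (hu : u < G.length)
    (h1 : s.getD u true = false) (h2 : blockedB s' u) : measB G s' < measB G s := by
  apply Finset.card_lt_card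
  constructor
  · intro v hv
    simp only [Finset.mem_filter, Finset.mem_range] at *
    rcases h v with h' | ⟨ha, hb⟩
    · exact ⟨hv.1, h'.symm.trans hv.2⟩
    · exact absurd (hb.symm.trans hv.2) (by simp)
  · intro hsub
    have := hsub (by simp only [Finset.mem_filter, Finset.mem_range]; exact ⟨hu, h1⟩)
    simp only [Finset.mem_filter, Finset.mem_range] at this
    exact absurd h2 (by rw [blockedB, this.2]; simp)

-- ===== DFS characterization =====
theorem dfs_fold (G : List (List Int)) (fuel : Nat)
    (IH : ∀ (u : Nat) (vis : List (Option Bool)),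
      u < G.length → vis.length = G.length → vis.getD u none = some false →
      measA G vis ≤ fuel →
      (dfsVisit G fuel u vis).length = G.length ∧
      EvoA vis (dfsVisit G fuel u vis) ∧
      (∀ v, blockedA (dfsVisit G fuel u vis) v ↔ (blockedA vis v ∨ Reach G (blockedA vis) u v)))
    (u : Nat) (vis : List (Option Bool)) :
    ∀ (l : List Nat) (vis1 : List (Option Bool)),
      (∀ v ∈ l, v < G.length) →
      vis1.length = G.length →
      EvoA vis vis1 →
      (∀ v, blockedA vis1 v → blockedA vis v ∨ Reach G (blockedA vis) u v) →
      blockedA vis1 u →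
      (∀ x, blockedA vis1 x → ¬ blockedA vis x → x ≠ u →
        ∀ w, w < G.length → adjP G x w → blockedA vis1 w) →
      (∀ w, w < G.length → adjP G u w → w ∈ l ∨ blockedA vis1 w) →
      measA G vis1 ≤ fuel →
      (let vis2 := l.foldl (fun vis v =>
          if vis.getD v none = some false ∧ (G.getD u []).getD v 0 = 1 then
            dfsVisit G fuel v vis
          else vis) vis1;
       vis2.length = G.length ∧ EvoA vis vis2 ∧
       (∀ v, blockedA vis2 v → blockedA vis v ∨ Reach G (blockedA vis) u v) ∧
       blockedA vis2 u ∧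
       (∀ x, blockedA vis2 x → ¬ blockedA vis x → x ≠ u →
         ∀ w, w < G.length → adjP G x w → blockedA vis2 w) ∧
       (∀ w, w < G.length → adjP G u w → blockedA vis2 w) ∧
       measA G vis2 ≤ fuel) := by
  intro l
  induction l with
  | nil =>
    intro vis1 hl hlen1 hevo hS hU hC hcu hm1
    refine ⟨hlen1, hevo, hS, hU, hC, ?_, hm1⟩
    intro w hw hadj
    rcases hcu w hw hadj with h | h
    · exact absurd h (List.not_mem_nil)
    · exact h
  | cons v l ih =>
    intro vis1 hl hlen1 hevo hS hU hC hcu hm1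
    simp only [List.foldl_cons]
    by_cases hcond : vis1.getD v none = some false ∧ (G.getD u []).getD v 0 = 1
    · rw [if_pos hcond]
      obtain ⟨hv1, hadjv⟩ := hcond
      have hvn : v < G.length := hl v (by simp)
      obtain ⟨len2, evo2, char2⟩ := IH v vis1 hvn hlen1 hv1 hm1
      set vis1' := dfsVisit G fuel v vis1 with hvis1'
      have hnbvisv : ¬ blockedA vis v := fun hb => (evoA_blocked hevo hb) hv1
      have hreachv : Reach G (blockedA vis) u v :=
        Reach.step Reach.base hadjv hvn hnbvisv
      have hS' : ∀ w, blockedA vis1' w → blockedA vis w ∨ Reach G (blockedA vis) u w := by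
        intro w hbw
        rcases (char2 w).1 hbw with h | h
        · exact hS w h
        · have := reach_absorb_multi (G := G) (b := blockedA vis) (b' := blockedA vis1)
            (R := fun r => r = u) (fun x hx => evoA_blocked hevo hx)
            h ⟨u, rfl, hreachv⟩
          obtain ⟨r, hr, hrw⟩ := this
          exact Or.inr (hr ▸ hrw)
      refine ih vis1' (fun x hx => hl x (by simp [hx])) len2
        (evoA_trans hevo evo2) hS' (evoA_blocked evo2 hU) ?_ ?_
        (le_trans (measA_mono evo2) hm1)
      · -- closedness
        intro x hbx hnbx hxu w hw hadjw
        by_cases hbx1 : blockedA vis1 x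
        · exact evoA_blocked evo2 (hC x hbx1 hnbx hxu w hw hadjw)
        · have hrx : Reach G (blockedA vis1) v x := by
            rcases (char2 x).1 hbx with h | h
            · exact absurd h hbx1
            · exact h
          by_cases hbw1 : blockedA vis1 w
          · exact (char2 w).2 (Or.inl hbw1)
          · exact (char2 w).2 (Or.inr (hrx.step hadjw hw hbw1))
      · -- remaining successors of u
        intro w hw hadjw
        rcases hcu w hw hadjw with hmem | hb
        · rcases List.mem_cons.1 hmem with rfl | hmem'
          · exact Or.inr ((char2 w).2 (Or.inr Reach.base))
          · exact Or.inl hmem'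
        · exact Or.inr (evoA_blocked evo2 hb)
    · rw [if_neg hcond]
      refine ih vis1 (fun x hx => hl x (by simp [hx])) hlen1 hevo hS hU hC ?_ hm1
      intro w hw hadjw
      rcases hcu w hw hadjw with hmem | hb
      · rcases List.mem_cons.1 hmem with rfl | hmem'
        · right
          intro hfalse
          exact hcond ⟨hfalse, hadjw⟩
        · exact Or.inl hmem'
      · exact Or.inr hb

theorem dfs_spec (G : List (List Int)) :
    ∀ (fuel : Nat) (u : Nat) (vis : List (Option Bool)),
      u < G.length → vis.length = G.length → vis.getD u none = some false →
      measA G vis ≤ fuel →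
      (dfsVisit G fuel u vis).length = G.length ∧
      EvoA vis (dfsVisit G fuel u vis) ∧
      (∀ v, blockedA (dfsVisit G fuel u vis) v ↔ (blockedA vis v ∨ Reach G (blockedA vis) u v)) := by
  intro fuel
  induction fuel with
  | zero =>
    intro u vis hu hlen hvu hm
    exfalso
    have hmem : u ∈ (Finset.range G.length).filter (fun v => vis.getD v none = some false) := by
      simp only [Finset.mem_filter, Finset.mem_range]
      exact ⟨hu, hvu⟩
    have : 0 < measA G vis := Finset.card_pos.2 ⟨u, hmem⟩
    omega
  | succ fuel IHf =>
    intro u vis hu hlen hvu hm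
    have hulen : u < vis.length := by rw [hlen]; exact hu
    have hlen0 : (vis.set u (some true)).length = G.length := by
      rw [List.length_set]; exact hlen
    have hget0 : ∀ w, (vis.set u (some true)).getD w none =
        if w = u then some true else vis.getD w none := by
      intro w
      rw [getD_set_eq_ite]
      by_cases hwu : w = u
      · rw [if_pos ⟨hwu, hulen⟩, if_pos hwu]
      · rw [if_neg (by tauto), if_neg hwu]
    have evo0 : EvoA vis (vis.set u (some true)) := by
      intro w
      rw [hget0]
      by_cases hwu : w = u
      · subst hwu; rw [if_pos rfl]; exact Or.inr ⟨hvu, rfl⟩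
      · rw [if_neg hwu]; exact Or.inl rfl
    have hU0 : blockedA (vis.set u (some true)) u := by
      rw [blockedA, hget0, if_pos rfl]; simp
    have hS0 : ∀ w, blockedA (vis.set u (some true)) w →
        blockedA vis w ∨ Reach G (blockedA vis) u w := by
      intro w hbw
      by_cases hwu : w = u
      · exact Or.inr (hwu ▸ Reach.base)
      · left; rw [blockedA, hget0, if_neg hwu] at hbw; exact hbw
    have hC0 : ∀ x, blockedA (vis.set u (some true)) x → ¬ blockedA vis x → x ≠ u →
        ∀ w, w < G.length → adjP G x w → blockedA (vis.set u (some true)) w := by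
      intro x hbx hnbx hxu
      exfalso
      rw [blockedA, hget0, if_neg hxu] at hbx
      exact hnbx hbx
    have hm0 : measA G (vis.set u (some true)) ≤ fuel := by
      have := measA_lt (G := G) evo0 hu hvu hU0
      omega
    have hfold := dfs_fold G fuel IHf u vis (List.range G.length) (vis.set u (some true))
      (fun v hv => List.mem_range.1 hv) hlen0 evo0 hS0 hU0 hC0
      (fun w hw _ => Or.inl (List.mem_range.2 hw)) hm0
    simp only at hfold
    obtain ⟨hlen2, hevo2, hS2, hU2, hC2, hcu2, hm2⟩ := hfold
    have hdef : dfsVisit G (fuel+1) u vis = (List.range G.length).foldl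
        (fun vis v =>
          if vis.getD v none = some false ∧ (G.getD u []).getD v 0 = 1 then
            dfsVisit G fuel v vis
          else vis)
        (vis.set u (some true)) := rfl
    rw [hdef]
    refine ⟨hlen2, hevo2, ?_⟩
    intro w
    constructor
    · exact hS2 w
    · intro h
      rcases h with h | h
      · exact evoA_blocked hevo2 h
      · induction h with
        | base => exact hU2
        | @step x w' hx hadj hw hb ihr =>
          by_cases hxu : x = u
          · exact hcu2 w' hw (hxu ▸ hadj)
          · rcases reach_blocked hx with h' | h'
            · exact absurd h' hxu
            · exact hC2 x ihr h' hxu w' hw hadj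

-- ===== BFS characterization =====
theorem bfsLoop_nil (G : List (List Int)) (fuel : Nat) (s : List Bool) :
    bfsLoop G fuel s [] = s := by
  cases fuel <;> rfl

theorem bfs_unblocked_lt {s : List Bool} {v : Nat} (h : s.getD v true = false) : v < s.length := by
  by_contra hge
  rw [List.getD_eq_default _ _ (by omega)] at h
  simp at h

theorem bfs_round_inner (G : List (List Int)) (x : Nat) :
    ∀ (lv : List Nat), (∀ v ∈ lv, v < G.length) →
    ∀ (s : List Bool) (ns : List Nat), s.length = G.length →
      (let p := lv.foldl
          (fun (q : List Bool × List Nat) v =>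
            if (G.getD x []).getD v 0 = 1 ∧ q.1.getD v true = false then
              (q.1.set v true, q.2 ++ [v])
            else q)
          (s, ns);
       p.1.length = G.length ∧ EvoB s p.1 ∧
       (∀ v, blockedB p.1 v → blockedB s v ∨ (v < G.length ∧ adjP G x v)) ∧
       (∀ v ∈ lv, adjP G x v → blockedB p.1 v) ∧
       (∀ v, v ∈ p.2 → v ∈ ns ∨ (v < G.length ∧ s.getD v true = false ∧ blockedB p.1 v)) ∧
       (∀ v ∈ ns, v ∈ p.2) ∧
       (∀ v, blockedB p.1 v → ¬ blockedB s v → v ∈ p.2)) := by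
  intro lv
  induction lv with
  | nil =>
    intro _ s ns hlen
    exact ⟨hlen, fun v => Or.inl rfl, fun v hb => Or.inl hb,
      fun v hv => absurd hv (List.not_mem_nil),
      fun v hv => Or.inl hv, fun v hv => hv, fun v hb hnb => absurd hb hnb⟩
  | cons v lv ih =>
    intro hlv s ns hlen
    simp only [List.foldl_cons]
    have hvn : v < G.length := hlv v (by simp)
    have hvlen : v < s.length := by rw [hlen]; exact hvn
    by_cases hcond : (G.getD x []).getD v 0 = 1 ∧ s.getD v true = false
    · rw [if_pos hcond]
      obtain ⟨hadj, hsv⟩ := hcond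
      have hget : ∀ w, (s.set v true).getD w true =
          if w = v then true else s.getD w true := by
        intro w
        rw [getD_set_eq_ite]
        by_cases hwv : w = v
        · rw [if_pos ⟨hwv, hvlen⟩, if_pos hwv]
        · rw [if_neg (by tauto), if_neg hwv]
      have hlen' : (s.set v true).length = G.length := by
        rw [List.length_set]; exact hlen
      have evo1 : EvoB s (s.set v true) := by
        intro w
        rw [hget]
        by_cases hwv : w = v
        · subst hwv; rw [if_pos rfl]; exact Or.inr ⟨hsv, rfl⟩
        · rw [if_neg hwv]; exact Or.inl rfl
      obtain ⟨plen, pevo, psound, pcomp, pnxt, pns, pR4⟩ :=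
        ih (fun w hw => hlv w (by simp [hw])) (s.set v true) (ns ++ [v]) hlen'
      refine ⟨plen, evoB_trans evo1 pevo, ?_, ?_, ?_, ?_, ?_⟩
      · intro w hbw
        rcases psound w hbw with hb | hr
        · rw [blockedB, hget] at hb
          by_cases hwv : w = v
          · subst hwv; exact Or.inr ⟨hvn, hadj⟩
          · rw [if_neg hwv] at hb; exact Or.inl hb
        · exact Or.inr hr
      · intro w hw hadjw
        rcases List.mem_cons.1 hw with rfl | hw'
        · exact evoB_blocked pevo (by rw [blockedB, hget, if_pos rfl])
        · exact pcomp w hw' hadjw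
      · intro w hw
        rcases pnxt w hw with hmem | ⟨hwn, hsw, hbw⟩
        · rcases List.mem_append.1 hmem with hmem' | hmem'
          · exact Or.inl hmem'
          · have : w = v := by simpa using hmem'
            subst this
            exact Or.inr ⟨hvn, hsv,
              evoB_blocked pevo (by rw [blockedB, hget, if_pos rfl])⟩
        · rw [hget] at hsw
          by_cases hwv : w = v
          · rw [if_pos hwv] at hsw; exact absurd hsw (by simp)
          · rw [if_neg hwv] at hsw; exact Or.inr ⟨hwn, hsw, hbw⟩
      · intro w hw
        exact pns w (List.mem_append.2 (Or.inl hw))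
      · intro w hbw hnbw
        by_cases hb1 : blockedB (s.set v true) w
        · rw [blockedB, hget] at hb1
          by_cases hwv : w = v
          · subst hwv; exact pns _ (List.mem_append.2 (Or.inr (by simp)))
          · rw [if_neg hwv] at hb1; exact absurd hb1 hnbw
        · exact pR4 w hbw hb1
    · rw [if_neg hcond]
      obtain ⟨plen, pevo, psound, pcomp, pnxt, pns, pR4⟩ :=
        ih (fun w hw => hlv w (by simp [hw])) s ns hlen
      refine ⟨plen, pevo, psound, ?_, pnxt, pns, pR4⟩
      intro w hw hadjw
      rcases List.mem_cons.1 hw with rfl | hw'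
      · have hsv : blockedB s w := by
          rw [blockedB]
          rcases Bool.eq_false_or_eq_true (s.getD w true) with h | h
          · exact h
          · exact absurd ⟨hadjw, h⟩ hcond
        exact evoB_blocked pevo hsv
      · exact pcomp w hw' hadjw

theorem bfs_round (G : List (List Int)) :
    ∀ (lf : List Nat) (s : List Bool) (ns : List Nat), s.length = G.length →
      (let p := lf.foldl
          (fun (q : List Bool × List Nat) x =>
            (List.range G.length).foldl
              (fun (q : List Bool × List Nat) v =>
                if (G.getD x []).getD v 0 = 1 ∧ q.1.getD v true = false then
                  (q.1.set v true, q.2 ++ [v])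
                else q)
              q)
          (s, ns);
       p.1.length = G.length ∧ EvoB s p.1 ∧
       (∀ v, blockedB p.1 v → blockedB s v ∨ (v < G.length ∧ ∃ x ∈ lf, adjP G x v)) ∧
       (∀ x ∈ lf, ∀ v, v < G.length → adjP G x v → blockedB p.1 v) ∧
       (∀ v, v ∈ p.2 → v ∈ ns ∨ (v < G.length ∧ s.getD v true = false ∧ blockedB p.1 v)) ∧
       (∀ v ∈ ns, v ∈ p.2) ∧
       (∀ v, blockedB p.1 v → ¬ blockedB s v → v ∈ p.2)) := by
  intro lf
  induction lf with
  | nil =>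
    intro s ns hlen
    exact ⟨hlen, fun v => Or.inl rfl, fun v hb => Or.inl hb,
      fun x hx => absurd hx (List.not_mem_nil),
      fun v hv => Or.inl hv, fun v hv => hv, fun v hb hnb => absurd hb hnb⟩
  | cons x lf ih =>
    intro s ns hlen
    simp only [List.foldl_cons]
    obtain ⟨ilen, ievo, isound, icomp, inxt, ins, iR4⟩ :=
      bfs_round_inner G x (List.range G.length) (fun w hw => List.mem_range.1 hw) s ns hlen
    set q1 := (List.range G.length).foldl
      (fun (q : List Bool × List Nat) v =>
        if (G.getD x []).getD v 0 = 1 ∧ q.1.getD v true = false then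
          (q.1.set v true, q.2 ++ [v])
        else q)
      (s, ns) with hq1
    obtain ⟨plen, pevo, psound, pcomp, pnxt, pns, pR4⟩ := ih q1.1 q1.2 ilen
    refine ⟨plen, evoB_trans ievo pevo, ?_, ?_, ?_, ?_, ?_⟩
    · intro v hbv
      rcases psound v hbv with hb | ⟨hvn, x', hx', hadj⟩
      · rcases isound v hb with hb' | ⟨hvn, hadj⟩
        · exact Or.inl hb'
        · exact Or.inr ⟨hvn, x, by simp, hadj⟩
      · exact Or.inr ⟨hvn, x', by simp [hx'], hadj⟩
    · intro x' hx' v hvn hadj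
      rcases List.mem_cons.1 hx' with rfl | hx''
      · exact evoB_blocked pevo (icomp v (List.mem_range.2 hvn) hadj)
      · exact pcomp x' hx'' v hvn hadj
    · intro v hv
      rcases pnxt v hv with hmem | ⟨hvn, hq1v, hbv⟩
      · rcases inxt v hmem with hmem' | ⟨hvn, hsv, hbv⟩
        · exact Or.inl hmem'
        · exact Or.inr ⟨hvn, hsv, evoB_blocked pevo hbv⟩
      · rcases ievo v with h | ⟨h1, h2⟩
        · exact Or.inr ⟨hvn, h.symm.trans hq1v, hbv⟩
        · exact absurd (h2.symm.trans hq1v) (by simp)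
    · intro v hv
      exact pns v (ins v hv)
    · intro v hbv hnbv
      by_cases hb1 : blockedB q1.1 v
      · exact pns v (iR4 v hb1 hnbv)
      · exact pR4 v hbv hb1

theorem bfs_spec (G : List (List Int)) :
    ∀ (fuel : Nat) (seen : List Bool) (frontier : List Nat),
      seen.length = G.length → (∀ x ∈ frontier, x < G.length ∧ blockedB seen x) →
      measB G seen ≤ fuel →
      (bfsLoop G fuel seen frontier).length = G.length ∧
      EvoB seen (bfsLoop G fuel seen frontier) ∧
      (∀ v, blockedB (bfsLoop G fuel seen frontier) v ↔
        (blockedB seen v ∨ ∃ x ∈ frontier, Reach G (blockedB seen) x v)) := by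
  intro fuel
  induction fuel with
  | zero =>
    intro seen frontier hlen hfr hm
    cases frontier with
    | nil =>
      rw [bfsLoop_nil]
      exact ⟨hlen, fun v => Or.inl rfl, fun v => ⟨fun h => Or.inl h, fun h => by
        rcases h with h | ⟨x, hx, _⟩
        · exact h
        · exact absurd hx (List.not_mem_nil)⟩⟩
    | cons f fs =>
      have hres : bfsLoop G 0 seen (f :: fs) = seen := rfl
      rw [hres]
      refine ⟨hlen, fun v => Or.inl rfl, fun v => ⟨fun h => Or.inl h, fun h => ?_⟩⟩
      rcases h with h | ⟨x, hx, hr⟩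
      · exact h
      · rcases reach_blocked hr with rfl | hnb
        · exact (hfr v hx).2
        · exfalso
          have hvf : seen.getD v true = false := by
            rcases Bool.eq_false_or_eq_true (seen.getD v true) with h' | h'
            · exact absurd h' hnb
            · exact h'
          have hvn : v < G.length := by rw [← hlen]; exact bfs_unblocked_lt hvf
          have hmem : v ∈ (Finset.range G.length).filter
              (fun w => seen.getD w true = false) := by
            simp only [Finset.mem_filter, Finset.mem_range]
            exact ⟨hvn, hvf⟩
          have : 0 < measB G seen := Finset.card_pos.2 ⟨v, hmem⟩
          omega
  | succ fuel IH =>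
    intro seen frontier hlen hfr hm
    cases frontier with
    | nil =>
      rw [bfsLoop_nil]
      exact ⟨hlen, fun v => Or.inl rfl, fun v => ⟨fun h => Or.inl h, fun h => by
        rcases h with h | ⟨x, hx, _⟩
        · exact h
        · exact absurd hx (List.not_mem_nil)⟩⟩
    | cons f fs =>
      obtain ⟨rlen, revo, rsound, rcomp, rnxt, rns, rR4⟩ :=
        bfs_round G (f :: fs) seen [] hlen
      set p := (f :: fs).foldl
        (fun (q : List Bool × List Nat) x =>
          (List.range G.length).foldl
            (fun (q : List Bool × List Nat) v =>
              if (G.getD x []).getD v 0 = 1 ∧ q.1.getD v true = false then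
                (q.1.set v true, q.2 ++ [v])
              else q)
            q)
        (seen, ([] : List Nat)) with hp
      have hres : bfsLoop G (fuel+1) seen (f :: fs) = bfsLoop G fuel p.1 p.2 := rfl
      rw [hres]
      -- facts about elements of p.2
      have hnxt : ∀ v ∈ p.2, v < G.length ∧ seen.getD v true = false ∧ blockedB p.1 v := by
        intro v hv
        rcases rnxt v hv with h | h
        · exact absurd h (List.not_mem_nil)
        · exact h
      -- soundness transfer from the round
      have sound' : ∀ v, blockedB p.1 v →
          blockedB seen v ∨ ∃ x ∈ (f :: fs), Reach G (blockedB seen) x v := by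
        intro v hbv
        rcases rsound v hbv with hb | ⟨hvn, x, hx, hadj⟩
        · exact Or.inl hb
        · by_cases hb0 : blockedB seen v
          · exact Or.inl hb0
          · exact Or.inr ⟨x, hx, Reach.step Reach.base hadj hvn hb0⟩
      -- a reachability round decomposition
      have hdecomp : ∀ x ∈ (f :: fs), ∀ v, Reach G (blockedB seen) x v →
          blockedB p.1 v ∨ ∃ x' ∈ p.2, Reach G (blockedB p.1) x' v := by
        intro x hx v hr
        induction hr with
        | base => exact Or.inl (evoB_blocked revo (hfr x hx).2)
        | @step y w hy hadj hw hb ihy =>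
          rcases ihy with hby | ⟨x', hx', hr'⟩
          · by_cases hb0 : blockedB seen y
            · rcases reach_blocked hy with rfl | hnb
              · exact Or.inl (rcomp y hx w hw hadj)
              · exact absurd hb0 hnb
            · have hyp2 : y ∈ p.2 := rR4 y hby hb0
              by_cases hbw : blockedB p.1 w
              · exact Or.inl hbw
              · exact Or.inr ⟨y, hyp2, Reach.step Reach.base hadj hw hbw⟩
          · by_cases hbw : blockedB p.1 w
            · exact Or.inl hbw
            · exact Or.inr ⟨x', hx', hr'.step hadj hw hbw⟩
      rcases hp2 : p.2 with _ | ⟨v0, vs⟩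
      · -- empty next frontier: loop returns p.1
        rw [bfsLoop_nil]
        refine ⟨rlen, revo, ?_⟩
        intro v
        constructor
        · exact sound' v
        · intro h
          rcases h with h | ⟨x, hx, hr⟩
          · exact evoB_blocked revo h
          · rcases hdecomp x hx v hr with h | ⟨x', hx', _⟩
            · exact h
            · rw [hp2] at hx'
              exact absurd hx' (List.not_mem_nil)
      · -- nonempty next frontier: measure decreases, recurse
        rw [← hp2]
        have hv0 : v0 ∈ p.2 := by rw [hp2]; simp
        obtain ⟨hv0n, hv0f, hv0b⟩ := hnxt v0 hv0
        have hmlt : measB G p.1 < measB G seen := measB_lt revo hv0n hv0f hv0b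
        have hm' : measB G p.1 ≤ fuel := by omega
        obtain ⟨flen, fevo, fchar⟩ := IH p.1 p.2 rlen
          (fun x hx => ⟨(hnxt x hx).1, (hnxt x hx).2.2⟩) hm'
        refine ⟨flen, evoB_trans revo fevo, ?_⟩
        intro v
        constructor
        · intro hbv
          rcases (fchar v).1 hbv with hb | ⟨x', hx', hr⟩
          · exact sound' v hb
          · have hx'reach : ∃ r, r ∈ (f :: fs) ∧ Reach G (blockedB seen) r x' := by
              obtain ⟨hx'n, hx'f, hx'b⟩ := hnxt x' hx'
              rcases sound' x' hx'b with hb0 | ⟨x, hx, hr'⟩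
              · exact absurd hb0 (by rw [blockedB, hx'f]; simp)
              · exact ⟨x, hx, hr'⟩
            obtain ⟨r, hrmem, hrr⟩ := reach_absorb_multi (G := G)
              (b := blockedB seen) (b' := blockedB p.1) (R := fun r => r ∈ (f :: fs))
              (fun w hw => evoB_blocked revo hw) hr hx'reach
            exact Or.inr ⟨r, hrmem, hrr⟩
        · intro h
          rcases h with h | ⟨x, hx, hr⟩
          · exact evoB_blocked fevo (evoB_blocked revo h)
          · rcases hdecomp x hx v hr with h | ⟨x', hx', hr'⟩
            · exact evoB_blocked fevo h
            · exact (fchar v).2 (Or.inr ⟨x', hx', hr'⟩)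

-- ===== inner-loop equivalence (one removed vertex i) =====
theorem inner_eq (G : List (List Int)) (i : Nat) :
    ∀ (l : List Nat), (∀ u ∈ l, u < G.length) →
    ∀ (vis : List (Option Bool)) (seen : List Bool) (cnt m0 : Int) (b0 : Option Int),
      vis.length = G.length → seen.length = G.length →
      (∀ v, blockedA vis v ↔ blockedB seen v) →
      blockedB seen i →
      (let stA := l.foldl
          (fun (st : List (Option Bool) × Int × Option Int × Int) u =>
            let st2 := if u ≠ i ∧ st.1.getD u none = some false then
                (dfsVisit G G.length u st.1, st.2.1 + 1, st.2.2.1, st.2.2.2)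
              else st
            if st2.2.1 > st2.2.2.2 then (st2.1, st2.2.1, some (i : Int), st2.2.1) else st2)
          (vis, cnt, (if m0 < cnt then some (i : Int) else b0), max m0 cnt);
        let stB := l.foldl
          (fun (p : Int × List Bool) u =>
            if p.2.getD u true = false then (p.1 + 1, bfsLoop G G.length (p.2.set u true) [u]) else p)
          (cnt, seen);
        stA.2.1 = stB.1 ∧ stA.2.2.1 = (if m0 < stB.1 then some (i : Int) else b0) ∧
          stA.2.2.2 = max m0 stB.1) := by
  intro l
  induction l with
  | nil =>
    intro _ vis seen cnt m0 b0 _ _ _ _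
    exact ⟨rfl, rfl, rfl⟩
  | cons u l ih =>
    intro hl vis seen cnt m0 b0 hlenA hlenB hbl hi
    have hu : u < G.length := hl u (by simp)
    have hul : u < seen.length := by rw [hlenB]; exact hu
    have hulA : u < vis.length := by rw [hlenA]; exact hu
    simp only [List.foldl_cons]
    by_cases hB : seen.getD u true = false
    · -- both loops visit u
      have hnbB : ¬ blockedB seen u := by rw [blockedB, hB]; simp
      have hfalse : vis.getD u none = some false := by
        by_contra hc
        exact hnbB ((hbl u).1 hc)
      have hne : u ≠ i := by
        intro h
        have h2 : seen.getD i true = true := hi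
        rw [h, h2] at hB
        exact Bool.noConfusion hB
      -- evaluate the A step
      have hcondA : u ≠ i ∧ vis.getD u none = some false := ⟨hne, hfalse⟩
      -- dfs and bfs characterizations
      obtain ⟨dlen, devo, dchar⟩ :=
        dfs_spec G G.length u vis hu hlenA hfalse (measA_le G vis)
      have hgetset : ∀ w, (seen.set u true).getD w true =
          if w = u then true else seen.getD w true := by
        intro w
        rw [getD_set_eq_ite]
        by_cases hwu : w = u
        · rw [if_pos ⟨hwu, hul⟩, if_pos hwu]
        · rw [if_neg (by tauto), if_neg hwu]
      obtain ⟨blen, bevo, bchar⟩ := bfs_spec G G.length (seen.set u true) [u]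
        (by rw [List.length_set]; exact hlenB)
        (by
          intro x hx
          have hxu : x = u := by simpa using hx
          subst hxu
          exact ⟨hu, by rw [blockedB, hgetset, if_pos rfl]⟩)
        (measB_le G _)
      -- the new blocked sets agree pointwise
      have hbl' : ∀ v, blockedA (dfsVisit G G.length u vis) v ↔
          blockedB (bfsLoop G G.length (seen.set u true) [u]) v := by
        intro v
        rw [dchar v, bchar v]
        have hsetiff : ∀ w, blockedB (seen.set u true) w ↔ (blockedB seen w ∨ w = u) := by
          intro w
          rw [blockedB, hgetset]
          by_cases hwu : w = u
          · simp [hwu]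
          · rw [if_neg hwu]; simp [blockedB, hwu]
        have hreach : Reach G (blockedB (seen.set u true)) u v ↔
            Reach G (blockedB seen) u v :=
          (reach_congr (G := G) (b := blockedB (seen.set u true))
            (b' := fun w => blockedB seen w ∨ w = u) hsetiff).trans
            (reach_diag (G := G) (b := blockedB seen)).symm
        constructor
        · intro h
          rcases h with h | h
          · exact Or.inl ((hsetiff v).2 (Or.inl ((hbl v).1 h)))
          · exact Or.inr ⟨u, by simp, hreach.2 ((reach_congr hbl).1 h)⟩
        · intro h
          rcases h with h | h
          · rcases (hsetiff v).1 h with h' | h'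
            · exact Or.inl ((hbl v).2 h')
            · exact Or.inr ((reach_congr hbl).2 (h' ▸ Reach.base))
          · obtain ⟨x, hx, hr⟩ := h
            have hxu : x = u := by simpa using hx
            subst hxu
            exact Or.inr ((reach_congr hbl).2 (hreach.1 hr))
      have hi' : blockedB (bfsLoop G G.length (seen.set u true) [u]) i :=
        evoB_blocked bevo (by
          rw [blockedB, hgetset]
          by_cases hiu : i = u
          · rw [if_pos hiu]
          · rw [if_neg hiu]; exact hi)
      -- evaluate both step functions
      rw [if_pos hB, if_pos hcondA]
      simp only [gt_iff_lt]
      by_cases hgt : max m0 cnt < cnt + 1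
      · rw [if_pos hgt]
        have h1 : m0 < cnt + 1 := lt_of_le_of_lt (le_max_left m0 cnt) hgt
        have h2 : max m0 (cnt + 1) = cnt + 1 := max_eq_right h1.le
        have := ih (fun w hw => hl w (by simp [hw]))
          (dfsVisit G G.length u vis) (bfsLoop G G.length (seen.set u true) [u])
          (cnt + 1) m0 b0 dlen blen hbl' hi'
        simp only [if_pos h1, h2] at this
        exact this
      · rw [if_neg hgt]
        have h1 : cnt + 1 ≤ m0 := by
          rcases max_cases m0 cnt with ⟨he, _⟩ | ⟨he, hlt⟩
          · omega
          · omega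
        have h2 : ¬ m0 < cnt := by omega
        have h3 : ¬ m0 < cnt + 1 := by omega
        have h4 : max m0 cnt = max m0 (cnt + 1) := by
          rw [max_eq_left (by omega), max_eq_left (by omega)]
        have := ih (fun w hw => hl w (by simp [hw]))
          (dfsVisit G G.length u vis) (bfsLoop G G.length (seen.set u true) [u])
          (cnt + 1) m0 b0 dlen blen hbl' hi'
        simp only [if_neg h3, ← h4] at this
        rw [if_neg h2]
        exact this
    · -- neither loop visits u
      have hBtrue : seen.getD u true = true := by
        rcases Bool.eq_false_or_eq_true (seen.getD u true) with h | h
        · exact h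
        · exact absurd h hB
      have hcondA : ¬ (u ≠ i ∧ vis.getD u none = some false) := by
        rintro ⟨_, hf⟩
        exact ((hbl u).2 hBtrue) hf
      rw [if_neg hB, if_neg hcondA]
      simp only [gt_iff_lt]
      rw [if_neg (not_lt.2 (le_max_right m0 cnt))]
      exact ih (fun w hw => hl w (by simp [hw])) vis seen cnt m0 b0 hlenA hlenB hbl hi

def cB (G : List (List Int)) (i : Nat) : Int :=
  ((List.range G.length).foldl
    (fun (p : Int × List Bool) u =>
      if p.2.getD u true = false then (p.1 + 1, bfsLoop G G.length (p.2.set u true) [u]) else p)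
    (0, (List.range G.length).map (fun u => u == i))).1

theorem bfold_fst_le (G : List (List Int)) :
    ∀ (l : List Nat) (p : Int × List Bool),
      p.1 ≤ (l.foldl
        (fun (p : Int × List Bool) u =>
          if p.2.getD u true = false then (p.1 + 1, bfsLoop G G.length (p.2.set u true) [u]) else p)
        p).1 := by
  intro l
  induction l with
  | nil => intro p; exact le_refl _
  | cons u l ih =>
    intro p
    simp only [List.foldl_cons]
    by_cases h : p.2.getD u true = false
    · rw [if_pos h]
      exact le_trans (by omega) (ih _)
    · rw [if_neg h]
      exact ih p

theorem cB_nonneg (G : List (List Int)) (i : Nat) : 0 ≤ cB G i :=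
  bfold_fst_le G (List.range G.length) (0, (List.range G.length).map (fun u => u == i))

theorem getD_map_range {α : Type} (f : Nat → α) (n v : Nat) (d : α) :
    ((List.range n).map f).getD v d = if v < n then f v else d := by
  rw [List.getD_eq_getElem?_getD, List.getElem?_map]
  by_cases hv : v < n
  · rw [List.getElem?_range hv, if_pos hv]
    rfl
  · rw [if_neg hv, List.getElem?_eq_none (by simpa using not_lt.1 hv)]
    rfl

theorem per_i (G : List (List Int)) (i : Nat) (hi : i < G.length) (b0 : Option Int) (m0 : Int)
    (hm0 : 0 ≤ m0) :
    (let visited := ((List.range G.length).map (fun _ => some false)).set i none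
     let st := (List.range G.length).foldl
        (fun (st : List (Option Bool) × Int × Option Int × Int) u =>
          let st2 := if u ≠ i ∧ st.1.getD u none = some false then
              (dfsVisit G G.length u st.1, st.2.1 + 1, st.2.2.1, st.2.2.2)
            else st
          if st2.2.1 > st2.2.2.2 then (st2.1, st2.2.1, some (i : Int), st2.2.1) else st2)
        (visited, 0, b0, m0)
     ((st.2.2.1, st.2.2.2) : Option Int × Int)) =
      ((if m0 < cB G i then some (i : Int) else b0), max m0 (cB G i)) := by
  have hlenA : (((List.range G.length).map (fun _ => some false)).set i none).length = G.length := by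
    rw [List.length_set, List.length_map, List.length_range]
  have hlenB : ((List.range G.length).map (fun u => (u == i : Bool))).length = G.length := by
    rw [List.length_map, List.length_range]
  have hgetA : ∀ v, (((List.range G.length).map (fun _ => (some false : Option Bool))).set i none).getD v none =
      if v = i then none else (if v < G.length then some false else none) := by
    intro v
    rw [getD_set_eq_ite, getD_map_range]
    by_cases hvi : v = i
    · rw [if_pos ⟨hvi, by rw [List.length_map, List.length_range]; exact hi⟩, if_pos hvi]
    · rw [if_neg (by tauto), if_neg hvi]
  have hgetB : ∀ v, ((List.range G.length).map (fun u => (u == i : Bool))).getD v true =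
      if v < G.length then (v == i : Bool) else true :=
    fun v => getD_map_range _ _ _ _
  have hbl0 : ∀ v, blockedA (((List.range G.length).map (fun _ => some false)).set i none) v ↔
      blockedB ((List.range G.length).map (fun u => (u == i : Bool))) v := by
    intro v
    rw [blockedA, blockedB, hgetA, hgetB]
    by_cases hvi : v = i
    · subst hvi
      rw [if_pos rfl, if_pos hi]
      simp
    · rw [if_neg hvi]
      by_cases hvn : v < G.length
      · rw [if_pos hvn, if_pos hvn]
        simp [hvi]
      · rw [if_neg hvn, if_neg hvn]
        simp
  have hi0 : blockedB ((List.range G.length).map (fun u => (u == i : Bool))) i := by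
    rw [blockedB, hgetB, if_pos hi]
    simp
  have h := inner_eq G i (List.range G.length) (fun w hw => List.mem_range.1 hw)
    (((List.range G.length).map (fun _ => some false)).set i none)
    ((List.range G.length).map (fun u => (u == i : Bool)))
    0 m0 b0 hlenA hlenB hbl0 hi0
  simp only at h
  rw [if_neg (not_lt.2 hm0), max_eq_left hm0] at h
  obtain ⟨h1, h2, h3⟩ := h
  simp only
  exact Prod.ext_iff.2 ⟨h2, h3⟩

theorem argmax_fold (c : Nat → Int) :
    ∀ (l : List Nat) (b0 : Option Int) (m0 : Int),
      (let r := l.foldl (fun (acc : Option Int × Int) i =>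
          ((if acc.2 < c i then some (i : Int) else acc.1), max acc.2 (c i))) (b0, m0);
       m0 ≤ r.2 ∧ r.2 = (l.map c).foldl max m0 ∧ (r.2 = m0 → r.1 = b0) ∧
        (m0 < r.2 → ∃ p j s, l = p ++ j :: s ∧ c j = r.2 ∧ (∀ k ∈ p, c k < r.2) ∧
          r.1 = some (j : Int))) := by
  intro l
  induction l with
  | nil =>
    intro b0 m0
    exact ⟨le_refl _, rfl, fun _ => rfl, fun h => absurd h (lt_irrefl _)⟩
  | cons j t ih =>
    intro b0 m0
    simp only [List.foldl_cons, List.map_cons]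
    by_cases hj : m0 < c j
    · rw [if_pos hj, max_eq_right hj.le]
      obtain ⟨ha, hmax, hb, hc'⟩ := ih (some (j : Int)) (c j)
      refine ⟨le_trans hj.le ha, hmax, ?_, ?_⟩
      · intro h
        rw [h] at ha
        exact absurd ha (not_le.2 hj)
      · intro _
        by_cases hr : (t.foldl (fun (acc : Option Int × Int) i =>
            ((if acc.2 < c i then some (i : Int) else acc.1), max acc.2 (c i)))
            (some (j : Int), c j)).2 = c j
        · exact ⟨[], j, t, rfl, hr.symm, fun k hk => absurd hk (List.not_mem_nil),
            hb hr⟩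
        · have hlt : c j < _ := lt_of_le_of_ne ha (fun h => hr h.symm)
          obtain ⟨p', j', s', ht, hcj', hpre, hr1⟩ := hc' hlt
          exact ⟨j :: p', j', s', by rw [ht]; rfl, hcj', by
            intro k hk
            rcases List.mem_cons.1 hk with rfl | hk'
            · exact hlt
            · exact hpre k hk', hr1⟩
    · rw [if_neg hj, max_eq_left (not_lt.1 hj)]
      obtain ⟨ha, hmax, hb, hc'⟩ := ih b0 m0
      refine ⟨ha, hmax, hb, ?_⟩
      intro hlt
      obtain ⟨p', j', s', ht, hcj', hpre, hr1⟩ := hc' hlt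
      exact ⟨j :: p', j', s', by rw [ht]; rfl, hcj', by
        intro k hk
        rcases List.mem_cons.1 hk with rfl | hk'
        · exact lt_of_le_of_lt (not_lt.1 hj) hlt
        · exact hpre k hk', hr1⟩

theorem outer_eq (G : List (List Int)) :
    ∀ (l : List Nat), (∀ i ∈ l, i < G.length) →
    ∀ (acc : Option Int × Int), 0 ≤ acc.2 →
      l.foldl
        (fun (acc : Option Int × Int) i =>
          let visited := ((List.range G.length).map (fun _ => some false)).set i none
          let st := (List.range G.length).foldl
            (fun (st : List (Option Bool) × Int × Option Int × Int) u =>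
              let st2 := if u ≠ i ∧ st.1.getD u none = some false then
                  (dfsVisit G G.length u st.1, st.2.1 + 1, st.2.2.1, st.2.2.2)
                else st
              if st2.2.1 > st2.2.2.2 then (st2.1, st2.2.1, some (i : Int), st2.2.1) else st2)
            (visited, 0, acc.1, acc.2)
          (st.2.2.1, st.2.2.2))
        acc =
      l.foldl (fun (acc : Option Int × Int) i =>
          ((if acc.2 < cB G i then some (i : Int) else acc.1), max acc.2 (cB G i))) acc := by
  intro l
  induction l with
  | nil => intro _ acc _; rfl
  | cons i l ih =>
    intro hl acc h0
    have hi : i < G.length := hl i (by simp)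
    simp only [List.foldl_cons]
    have hstep := per_i G i hi acc.1 acc.2 h0
    simp only at hstep
    rw [hstep]
    exact ih (fun w hw => hl w (by simp [hw]))
      ((if acc.2 < cB G i then some (i : Int) else acc.1), max acc.2 (cB G i))
      (le_trans h0 (le_max_left _ _))

theorem counts_eq_map (G : List (List Int)) :
    (List.range G.length).foldl
      (fun (cs : List Int) i =>
        let seen := (List.range G.length).map (fun u => (u == i : Bool))
        let p := (List.range G.length).foldl
          (fun (p : Int × List Bool) u =>
            if p.2.getD u true = false then (p.1 + 1, bfsLoop G G.length (p.2.set u true) [u]) else p)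
          (0, seen)
        cs ++ [p.1]) ([] : List Int) = (List.range G.length).map (cB G) := by
  have h := PySem.List.foldl_append_singleton_eq_map (f := cB G)
    (l := List.range G.length) (acc := ([] : List Int))
  simpa using h

-- ===== VERDICT (by name: the statement is the Claim_ definition above) =====
theorem breaking_spec : Claim_equal_breaking := by
  unfold Claim_equal_breaking
  intro G _ _
  unfold Spec_breaking breaking breaking_alt
  simp only
  have houter := outer_eq G (List.range G.length) (fun w hw => List.mem_range.1 hw)
    (none, 0) (le_refl 0)
  simp only at houter
  rw [houter, counts_eq_map G]
  have hargs := argmax_fold (cB G) (List.range G.length) none 0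
  simp only at hargs
  obtain ⟨h0le, hmaxeq, heq0, hdec⟩ := hargs
  set r := (List.range G.length).foldl
    (fun (acc : Option Int × Int) i =>
      ((if acc.2 < cB G i then some (i : Int) else acc.1), max acc.2 (cB G i))) (none, 0) with hr
  rcases hrange : List.range G.length with _ | ⟨r0, rt⟩
  · -- empty graph
    have hr2 : r = (none, 0) := by simp [hr, hrange]
    rw [hr2]
    rfl
  · -- the maximum computed by B equals r.2
    have hmstar : (PySem.List.max? (List.map (cB G) (r0 :: rt)) (fun x => x)).getD 0 = r.2 := by
      rw [List.map_cons, PySem.List.max?_id_cons]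
      rw [hmaxeq, hrange, List.map_cons, List.foldl_cons,
        max_eq_right (cB_nonneg G r0)]
      rfl
    rw [hmstar]
    by_cases h1 : r.2 = 1
    · rw [if_pos h1, if_neg (by omega)]
    · rw [if_neg h1]
      by_cases h2 : r.2 ≥ 2
      · rw [if_pos h2]
        obtain ⟨p, j, sfx, hsplit, hcj, hpre, hr1⟩ := hdec (by omega)
        have hlenp : p.length < (List.range G.length).length := by
          rw [hsplit]; simp
        have hj : j = p.length := by
          have h2' : (List.range G.length)[p.length]? = some p.length :=
            List.getElem?_range (by simpa using hlenp)
          rw [hsplit, List.getElem?_append_right (le_refl p.length)] at h2'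
          simp at h2'
          omega
        have hnotmem : r.2 ∉ List.map (cB G) p := by
          intro hmem
          obtain ⟨k, hk, hck⟩ := List.mem_map.1 hmem
          exact absurd (hck ▸ hpre k hk) (lt_irrefl _)
        have hsplit' : List.map (cB G) (r0 :: rt) =
            List.map (cB G) p ++ r.2 :: List.map (cB G) sfx := by
          rw [← hrange, hsplit, List.map_append, List.map_cons, hcj]
        have hidx2 : PySem.List.index? (List.map (cB G) (r0 :: rt)) r.2 =
            some p.length := by
          rw [PySem.List.index?_eq_some_iff]
          exact ⟨List.map (cB G) p, List.map (cB G) sfx, hsplit',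
            List.length_map _, hnotmem⟩
        rw [hidx2, hr1, hj]
        rfl
      · rw [if_neg h2]
        have h0 : r.2 = 0 := by omega
        exact heq0 h0
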